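-- pv_equiv track=rewrite | github.com/akgitub/TicketVault | Backend/scraper/scrapers/bookmyshow.py | _extract_venue_date
-- ===== SOURCE A (Python) =====
-- def _extract_venue_date(texts: list[str]) -> tuple[str | None, str | None]:
--     """
--     Given the remaining texts from a card (after the name),
--     classify each as a date string or venue string.
--     """
--     month_kw = {
--         "jan","feb","mar","apr","may","jun",
--         "jul","aug","sep","oct","nov","dec",
--         "january","february","march","april","june","july",
--         "august","september","october","november","december",
--     }
--     day_kw  = {"mon","tue","wed","thu","fri","sat","sun"}
--     misc_kw = {"onwards","2024","2025","2026","today","tomorrow"}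
--     all_kw  = month_kw | day_kw | misc_kw
--
--     date_text  = None
--     venue_text = None
--
--     for t in texts:
--         lower = t.lower()
--         has_kw    = any(kw in lower for kw in all_kw)
--         has_digit = any(c.isdigit() for c in t)
--
--         # Skip category labels like "Concerts", "Sports"
--         if t.lower() in {
--             "concerts","plays","sports","activities","events",
--             "comedy","music","kids","workshop",
--         }:
--             continue
--
--         if has_kw and (has_digit or any(kw in lower for kw in misc_kw)):
--             if date_text is None:
--                 date_text = t
--         elif venue_text is None and len(t) > 2:
--             venue_text = t
--
--     return venue_text, date_text
-- ===== SOURCE B (Python) =====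
-- MONTH_KW = {
--     "jan","feb","mar","apr","may","jun",
--     "jul","aug","sep","oct","nov","dec",
--     "january","february","march","april","june","july",
--     "august","september","october","november","december",
-- }
-- DAY_KW = {"mon","tue","wed","thu","fri","sat","sun"}
-- MISC_KW = {"onwards","2024","2025","2026","today","tomorrow"}
-- ALL_KW = MONTH_KW | DAY_KW | MISC_KW
-- CATEGORIES = {
--     "concerts","plays","sports","activities","events",
--     "comedy","music","kids","workshop",
-- }
--
--
-- def _is_date(t: str) -> bool:
--     lower = t.lower()
--     if lower in CATEGORIES:
--         return False
--     has_kw = any(kw in lower for kw in ALL_KW)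
--     has_digit = any(c.isdigit() for c in t)
--     has_misc = any(kw in lower for kw in MISC_KW)
--     return has_kw and (has_digit or has_misc)
--
--
-- def _extract_venue_date(texts: list[str]) -> tuple[str | None, str | None]:
--     date_text = next((t for t in texts if _is_date(t)), None)
--     venue_text = next(
--         (t for t in texts
--          if t.lower() not in CATEGORIES and not _is_date(t) and len(t) > 2),
--         None,
--     )
--     return venue_text, date_text
-- ===== Notes on version B (the rewrite author's own statement) =====
-- stated objective: simpler
-- what changed: Replaces the single pass with two shared mutable accumulators by a pure helper predicate _is_date plus two independent first-match scans (next over a generator) for date and venue.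
import Mathlib
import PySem

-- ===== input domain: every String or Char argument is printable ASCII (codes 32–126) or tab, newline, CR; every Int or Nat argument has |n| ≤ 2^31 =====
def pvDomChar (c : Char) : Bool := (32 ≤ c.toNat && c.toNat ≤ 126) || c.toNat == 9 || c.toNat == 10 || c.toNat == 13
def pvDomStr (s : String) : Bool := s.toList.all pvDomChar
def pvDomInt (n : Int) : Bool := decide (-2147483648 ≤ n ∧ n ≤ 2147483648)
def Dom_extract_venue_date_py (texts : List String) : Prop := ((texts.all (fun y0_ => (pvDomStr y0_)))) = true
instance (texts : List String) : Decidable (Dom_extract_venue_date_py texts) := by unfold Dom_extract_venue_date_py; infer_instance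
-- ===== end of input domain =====

-- B replaces A's one pass with shared accumulators by a pure date predicate and two
-- independent first-match scans (objective: simpler decomposition; same cost).

-- ===== PORT A =====
def pvMonthKw : PySem.Set String := PySem.Set.ofList
  ["jan","feb","mar","apr","may","jun","jul","aug","sep","oct","nov","dec",
   "january","february","march","april","june","july",
   "august","september","october","november","december"]
def pvDayKw : PySem.Set String := PySem.Set.ofList ["mon","tue","wed","thu","fri","sat","sun"]
def pvMiscKw : PySem.Set String := PySem.Set.ofList ["onwards","2024","2025","2026","today","tomorrow"]
def pvAllKw : PySem.Set String := PySem.Set.union (PySem.Set.union pvMonthKw pvDayKw) pvMiscKw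
def pvCategories : PySem.Set String := PySem.Set.ofList
  ["concerts","plays","sports","activities","events","comedy","music","kids","workshop"]

-- the for-loop of A, state = (date_text, venue_text)
def pvLoopA : List String → Option String → Option String → Option String × Option String
  | [], dateText, venueText => (venueText, dateText)
  | t :: ts, dateText, venueText =>
    let lower := PySem.Str.lower t
    let hasKw := (pvAllKw : List String).any (fun kw => PySem.Str.isIn kw lower)
    let hasDigit := t.toList.any PySem.Chars.isdigit
    if PySem.Set.contains pvCategories (PySem.Str.lower t) then
      pvLoopA ts dateText venueText
    else if hasKw && (hasDigit || (pvMiscKw : List String).any (fun kw => PySem.Str.isIn kw lower)) then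
      pvLoopA ts (if dateText.isNone then some t else dateText) venueText
    else if venueText.isNone && decide ((PySem.Str.len t : Int) > 2) then
      pvLoopA ts dateText (some t)
    else
      pvLoopA ts dateText venueText

def extract_venue_date_py (texts : List String) : Option String × Option String :=
  pvLoopA texts none none

-- ===== PORT B =====
def pvIsDateB (t : String) : Bool :=
  let lower := PySem.Str.lower t
  if PySem.Set.contains pvCategories lower then false
  else
    let hasKw := (pvAllKw : List String).any (fun kw => PySem.Str.isIn kw lower)
    let hasDigit := t.toList.any PySem.Chars.isdigit
    let hasMisc := (pvMiscKw : List String).any (fun kw => PySem.Str.isIn kw lower)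
    hasKw && (hasDigit || hasMisc)

def extract_venue_date_py_alt (texts : List String) : Option String × Option String :=
  let dateText := texts.find? pvIsDateB
  let venueText := texts.find? (fun t =>
    !PySem.Set.contains pvCategories (PySem.Str.lower t) && !pvIsDateB t
      && decide ((PySem.Str.len t : Int) > 2))
  (venueText, dateText)

-- ===== PRECONDITION & SPEC =====
def Spec_extract_venue_date_py (texts : List String) (out : Option String × Option String) : Prop := out = extract_venue_date_py_alt texts
instance (texts : List String) (out : Option String × Option String) : Decidable (Spec_extract_venue_date_py texts out) := by unfold Spec_extract_venue_date_py; infer_instance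

-- ===== CLAIM (what is proved, stated in full; the proofs are below) =====
def Claim_equal_extract_venue_date_py : Prop := ∀ (texts : List String), Dom_extract_venue_date_py texts → Spec_extract_venue_date_py texts (extract_venue_date_py texts)

-- ===== LEMMAS AND PROOFS =====

-- B's venue predicate, named for the proofs
def pvVenueB (t : String) : Bool :=
  !PySem.Set.contains pvCategories (PySem.Str.lower t) && !pvIsDateB t
    && decide ((PySem.Str.len t : Int) > 2)

-- invariant of A's loop: accumulators fall back to the first-match scans
theorem pvLoopA_eq : ∀ (ts : List String) (d v : Option String),
    pvLoopA ts d v = ((v.orElse fun _ => ts.find? pvVenueB),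
                      (d.orElse fun _ => ts.find? pvIsDateB)) := by
  intro ts
  induction ts with
  | nil => intro d v; cases d <;> cases v <;> rfl
  | cons t ts ih =>
    intro d v
    cases hc : PySem.Set.contains pvCategories (PySem.Str.lower t) with
    | true =>
      have hdate : ¬ pvIsDateB t = true := by
        simp only [pvIsDateB, hc, if_true]; exact Bool.false_ne_true
      have hven : ¬ pvVenueB t = true := by
        simp only [pvVenueB, hc, Bool.not_true, Bool.false_and]; exact Bool.false_ne_true
      rw [List.find?_cons_of_neg hdate, List.find?_cons_of_neg hven]
      simp only [pvLoopA, hc, if_true, ih]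
    | false =>
      cases hd : ((pvAllKw : List String).any (fun kw => PySem.Str.isIn kw (PySem.Str.lower t)) &&
          (t.toList.any PySem.Chars.isdigit ||
           (pvMiscKw : List String).any (fun kw => PySem.Str.isIn kw (PySem.Str.lower t)))) with
      | true =>
        have hdate : pvIsDateB t = true := by
          simp only [pvIsDateB, hc, Bool.false_eq_true, if_false]; exact hd
        have hven : ¬ pvVenueB t = true := by
          simp only [pvVenueB, hdate, Bool.not_true, Bool.and_false, Bool.false_and]
          exact Bool.false_ne_true
        rw [List.find?_cons_of_pos hdate, List.find?_cons_of_neg hven]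
        simp only [pvLoopA, hc, hd, Bool.false_eq_true, if_false, if_true, ih]
        cases d <;> cases v <;> rfl
      | false =>
        have hdate : pvIsDateB t = false := by
          simp only [pvIsDateB, hc, Bool.false_eq_true, if_false]; exact hd
        have hdate' : ¬ pvIsDateB t = true := by simp [hdate]
        have hven : pvVenueB t = decide ((PySem.Str.len t : Int) > 2) := by
          simp only [pvVenueB, hdate, hc, Bool.not_false, Bool.true_and]
        rw [List.find?_cons_of_neg hdate']
        simp only [pvLoopA, hc, hd, Bool.false_eq_true, if_false]
        cases v with
        | some w =>
          simp only [Option.isNone_some, Bool.false_and, Bool.false_eq_true, if_false, ih]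
          rfl
        | none =>
          cases hl : decide ((PySem.Str.len t : Int) > 2) with
          | true =>
            have hvt : pvVenueB t = true := by rw [hven, hl]
            rw [List.find?_cons_of_pos hvt]
            simp only [Option.isNone_none, Bool.true_and, if_true, ih]
            rfl
          | false =>
            have hvf : ¬ pvVenueB t = true := by rw [hven, hl]; exact Bool.false_ne_true
            rw [List.find?_cons_of_neg hvf]
            simp only [Option.isNone_none, Bool.true_and, Bool.false_eq_true, if_false, ih]

-- ===== VERDICT (by name: the statement is the Claim_ definition above) =====
theorem extract_venue_date_py_spec : Claim_equal_extract_venue_date_py := by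
  intro texts _
  unfold Spec_extract_venue_date_py extract_venue_date_py extract_venue_date_py_alt
  rw [pvLoopA_eq]
  rfl
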